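-- pv_equiv track=rewrite | github.com/AswinBlue/acmicpc | 1006/try2.py | next
-- ===== SOURCE A (Python) =====
-- def next(visit, x, y):
--     x_, y_ = 0, 0
--     if x == 0:
--         x_, y_ = 1, y
--     else:
--         x_, y_ = 0, y + 1
--
--     if visit[x_][y_] == 0:
--         return x_, y_
--     else:
--         return next(visit, x_, y_)
-- ===== SOURCE B (Python) =====
-- def next(visit, x, y):
--     # unrolled column scan: special-case the cell below the start, then walk
--     # whole columns left to right, checking the top and bottom cell of each
--     if x == 0:
--         if visit[1][y] == 0:
--             return (1, y)
--     c = y + 1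
--     while True:
--         if visit[0][c] == 0:
--             return (0, c)
--         if visit[1][c] == 0:
--             return (1, c)
--         c += 1
-- ===== Notes on version B (the rewrite author's own statement) =====
-- stated objective: simpler
-- what changed: Replaces A's one-cell-per-call recursion on (x, y) with an iterative loop that first special-cases the cell below the start and then scans whole columns left to right, testing the top and bottom cell of each column per iteration.
import Mathlib
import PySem

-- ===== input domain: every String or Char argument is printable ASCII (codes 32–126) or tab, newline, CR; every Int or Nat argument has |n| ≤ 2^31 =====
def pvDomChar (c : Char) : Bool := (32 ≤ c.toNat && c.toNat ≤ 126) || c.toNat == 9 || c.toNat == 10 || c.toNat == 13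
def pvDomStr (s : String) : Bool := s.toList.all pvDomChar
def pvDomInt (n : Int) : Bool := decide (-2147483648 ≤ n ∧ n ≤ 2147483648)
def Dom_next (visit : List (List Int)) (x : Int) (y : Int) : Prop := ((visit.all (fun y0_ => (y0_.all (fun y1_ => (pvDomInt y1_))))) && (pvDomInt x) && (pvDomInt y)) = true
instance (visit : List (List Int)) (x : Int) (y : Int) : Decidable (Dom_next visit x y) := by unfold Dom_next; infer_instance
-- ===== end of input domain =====

-- B unrolls A's one-cell-at-a-time recursion into a column loop: one special
-- check of the cell below the start, then whole columns (top cell, bottom cell)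
-- left to right (simpler decomposition, same cost).

-- ===== PORT A =====
-- visit[x_][y_] as Python computes it (negative indices wrap; none = IndexError)
def cellA (visit : List (List Int)) (x_ y_ : Int) : Option Int :=
  (PySem.List.pyGet? visit x_).bind (fun row => PySem.List.pyGet? row y_)

-- fuel bound for totality only: under Pre_next the scan returns well within it
def scanFuel (visit : List (List Int)) : Nat :=
  4 * (visit.foldr (fun r m => max r.length m) 0) + 4

def nextAux (visit : List (List Int)) (x y : Int) : Nat → Int × Int := fun fuel =>
  let x_ : Int := if x = 0 then 1 else 0
  let y_ : Int := if x = 0 then y else y + 1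
  if cellA visit x_ y_ = some 0 then (x_, y_)
  else
    match fuel with
    | 0 => (x_, y_)            -- fuel exhausted: Python A raises here (outside Pre_next)
    | f + 1 => nextAux visit x_ y_ f

def next (visit : List (List Int)) (x : Int) (y : Int) : Int × Int :=
  nextAux visit x y (scanFuel visit)

-- ===== PORT B =====
-- the column loop of Source B: check visit[0][c], then visit[1][c], then move on
def colLoop (visit : List (List Int)) (c : Int) : Nat → Int × Int := fun fuel =>
  if (PySem.List.pyGet? visit 0).bind (fun row => PySem.List.pyGet? row c) = some 0 then
    (0, c)
  else
    match fuel with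
    | 0 => (0, c)              -- fuel exhausted (outside Pre_next)
    | f + 1 =>
      if (PySem.List.pyGet? visit 1).bind (fun row => PySem.List.pyGet? row c) = some 0 then
        (1, c)
      else
        match f with
        | 0 => (1, c)          -- fuel exhausted (outside Pre_next)
        | g + 1 => colLoop visit (c + 1) g

def next_alt (visit : List (List Int)) (x : Int) (y : Int) : Int × Int :=
  if x = 0 ∧ (PySem.List.pyGet? visit 1).bind (fun row => PySem.List.pyGet? row y) = some 0 then
    (1, y)
  else
    colLoop visit (y + 1) (scanFuel visit - (if x = 0 then 1 else 0))

-- ===== PRECONDITION & SPEC =====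
-- visit[k % 2][k // 2] with Python's floor mod / floor division (linearized key)
def cellK (visit : List (List Int)) (k : Int) : Option Int :=
  (PySem.List.pyGet? visit (PySem.Int.mod k 2)).bind
    (fun row => PySem.List.pyGet? row (PySem.Int.floordiv k 2))

-- Pre_next holds exactly when the Python A returns normally: some cell of the scan
-- (at key offset n from the start key) is 0 and every cell scanned before it is in
-- range; outside it A raises IndexError (or recurses forever on an empty-width scan).
def Pre_next (visit : List (List Int)) (x : Int) (y : Int) : Prop :=
  ∃ n : Nat, n < scanFuel visit ∧
    cellK visit (2 * y + (if x = 0 then 1 else 2) + n) = some 0 ∧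
    ∀ m : Nat, m < n → (cellK visit (2 * y + (if x = 0 then 1 else 2) + m)).isSome
instance (visit : List (List Int)) (x : Int) (y : Int) : Decidable (Pre_next visit x y) := by
  unfold Pre_next; infer_instance

def pvWitness_next : List (List Int) × Int × Int := ([[1, 1], [0, 0]], 0, 0)

def Spec_next (visit : List (List Int)) (x : Int) (y : Int) (out : Int × Int) : Prop := out = next_alt visit x y
instance (visit : List (List Int)) (x : Int) (y : Int) (out : Int × Int) : Decidable (Spec_next visit x y out) := by unfold Spec_next; infer_instance

-- ===== CLAIM (what is proved, stated in full; the proofs are below) =====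
def Claim_equal_next : Prop := ∀ (visit : List (List Int)) (x : Int) (y : Int), Dom_next visit x y → Pre_next visit x y → Spec_next visit x y (next visit x y)

-- ===== LEMMAS AND PROOFS =====

-- A's recursion from a non-top cell of column c equals B's column loop from c+1
lemma aux_eq_colLoop (visit : List (List Int)) :
    ∀ (fuel : Nat) (x c : Int), x ≠ 0 →
      nextAux visit x c fuel = colLoop visit (c + 1) fuel := by
  intro fuel
  induction fuel using Nat.strong_induction_on with
  | _ fuel ih =>
    intro x c hx
    match fuel with
    | 0 =>
      simp [nextAux, colLoop, hx, cellA]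
    | 1 =>
      by_cases h0 : (PySem.List.pyGet? visit 0).bind (fun row => PySem.List.pyGet? row (c + 1)) = some 0
      · simp [nextAux, colLoop, hx, cellA, h0]
      · simp [nextAux, colLoop, hx, cellA, h0]
    | g + 2 =>
      by_cases h0 : (PySem.List.pyGet? visit 0).bind (fun row => PySem.List.pyGet? row (c + 1)) = some 0
      · simp [nextAux, colLoop, hx, cellA, h0]
      · by_cases h1 : (PySem.List.pyGet? visit 1).bind (fun row => PySem.List.pyGet? row (c + 1)) = some 0
        · simp [nextAux, colLoop, hx, cellA, h0, h1]
        · simp only [nextAux, colLoop, hx, ite_false, ite_true, cellA, h0, h1]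
          simpa [nextAux, cellA, h1] using ih g (by omega) 1 (c + 1) (by norm_num)

lemma scanFuel_pos (visit : List (List Int)) : ∃ f : Nat, scanFuel visit = f + 1 := by
  exact ⟨4 * (visit.foldr (fun r m => max r.length m) 0) + 3, rfl⟩

-- ===== VERDICT (by name: the statement is the Claim_ definition above) =====
theorem next_spec : Claim_equal_next := by
  intro visit x y _ _
  unfold Spec_next next next_alt
  obtain ⟨f, hf⟩ := scanFuel_pos visit
  by_cases hx : x = 0
  · subst hx
    rw [hf]
    by_cases h1 : (PySem.List.pyGet? visit 1).bind (fun row => PySem.List.pyGet? row y) = some 0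
    · simp [nextAux, cellA, h1]
    · simp only [nextAux, cellA, ite_true, h1, ite_false, and_false]
      rw [aux_eq_colLoop visit f 1 y (by norm_num)]
      norm_num
  · rw [aux_eq_colLoop visit (scanFuel visit) x y hx]
    simp [hx]
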